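-- pv_equiv track=rewrite | github.com/zihangH-code/schedule | src/visualize_planning_data.py | topological_levels
-- ===== SOURCE A (Python) =====
-- from collections import Counter, defaultdict, deque
--
-- def topological_levels(step_ids: list[int], edges: list[tuple[int, int]]) -> dict[int, int]:
--     succ: dict[int, list[int]] = defaultdict(list)
--     indeg = {sid: 0 for sid in step_ids}
--     for src, dst in edges:
--         succ[src].append(dst)
--         indeg[dst] += 1
--     queue = deque([sid for sid in step_ids if indeg[sid] == 0])
--     level = {sid: 0 for sid in step_ids}
--     visited = 0
--     while queue:
--         curr = queue.popleft()
--         visited += 1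
--         for nxt in succ[curr]:
--             level[nxt] = max(level[nxt], level[curr] + 1)
--             indeg[nxt] -= 1
--             if indeg[nxt] == 0:
--                 queue.append(nxt)
--     if visited != len(step_ids):
--         raise ValueError("检测到工艺路线 DAG 存在环。")
--     return level
-- ===== SOURCE B (Python) =====
-- def topological_levels(step_ids: list[int], edges: list[tuple[int, int]]) -> dict[int, int]:
--     # Bellman-Ford-style longest-path relaxation: repeatedly relax every edge
--     # until a fixpoint; a level would exceed the round budget only on a cycle.
--     level = {sid: 0 for sid in step_ids}
--     for _ in range(len(step_ids)):
--         changed = False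
--         for src, dst in edges:
--             cand = level[src] + 1
--             if cand > level[dst]:
--                 level[dst] = cand
--                 changed = True
--         if not changed:
--             break
--     for src, dst in edges:
--         if level[src] + 1 > level[dst]:
--             raise ValueError("检测到工艺路线 DAG 存在环。")
--     return level
-- ===== Notes on version B (the rewrite author's own statement) =====
-- stated objective: alternative
-- what changed: Replaces Kahn's indegree/queue BFS with Bellman-Ford-style longest-path relaxation: relax every edge until a fixpoint (at most n rounds), then report a cycle iff some edge is still relaxable.
-- outside the precondition, e.g. on topological_levels([1, 1], []): A returns {1: 0}, B returns {1: 0}; on topological_levels([2, 5, -4, 8, 2, 5], [(0, 8), (5, 8)]): A returns {2: 0, 5: 0, -4: 0, 8: 1}, B raises KeyError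
import Mathlib
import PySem

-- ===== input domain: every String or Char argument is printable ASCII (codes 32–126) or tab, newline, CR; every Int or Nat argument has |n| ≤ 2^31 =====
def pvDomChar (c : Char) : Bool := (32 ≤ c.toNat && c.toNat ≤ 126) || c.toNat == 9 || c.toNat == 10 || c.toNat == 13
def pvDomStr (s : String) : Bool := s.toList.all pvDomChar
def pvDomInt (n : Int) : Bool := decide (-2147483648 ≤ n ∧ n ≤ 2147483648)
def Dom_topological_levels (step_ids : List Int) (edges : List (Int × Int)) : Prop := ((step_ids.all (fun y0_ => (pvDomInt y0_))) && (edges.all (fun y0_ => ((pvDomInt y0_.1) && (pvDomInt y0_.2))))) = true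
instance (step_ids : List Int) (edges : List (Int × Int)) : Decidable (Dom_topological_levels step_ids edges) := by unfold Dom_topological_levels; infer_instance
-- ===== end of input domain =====

-- B replaces A's Kahn indegree/queue BFS by Bellman-Ford-style edge relaxation to a fixpoint
-- (alternative algorithm, no speed claim); both return the same dict on every Pre_ input.

-- ===== PORT A =====
-- body of A's inner 'for nxt in succ[curr]' loop (updates level, indeg, queue)

def kahnStep (curr : Int) (st : PySem.Dict Int Int × PySem.Dict Int Int × List Int) (nxt : Int) :
    PySem.Dict Int Int × PySem.Dict Int Int × List Int :=
  let lv := st.1; let ind := st.2.1; let q := st.2.2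
  let lv' := lv.insert nxt (max (lv.getD nxt 0) (lv.getD curr 0 + 1))
  let ind' := ind.insert nxt (ind.getD nxt 0 - 1)
  (lv', ind', if ind'.getD nxt 0 == 0 then q ++ [nxt] else q)

-- A's 'while queue' loop, fuel-based (the fuel below is never exhausted on Pre_ inputs)

def kahnLoop (succ : PySem.Dict Int (List Int)) :
    Nat → List Int → PySem.Dict Int Int → PySem.Dict Int Int → Int → PySem.Dict Int Int × Int
  | 0, _, _, lv, visited => (lv, visited)
  | _ + 1, [], _, lv, visited => (lv, visited)
  | fuel + 1, curr :: q, ind, lv, visited =>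
      let st := (succ.getD curr []).foldl (kahnStep curr) (lv, ind, q)
      kahnLoop succ fuel st.2.2 st.2.1 st.1 (visited + 1)

def topological_levels (step_ids : List Int) (edges : List (Int × Int)) : List (Int × Int) :=
  let succ := edges.foldl (fun d p => d.modify p.1 [] (· ++ [p.2])) PySem.Dict.empty
  let indeg0 := step_ids.foldl (fun d sid => d.insert sid (0 : Int)) PySem.Dict.empty
  let indeg := edges.foldl (fun d p => d.insert p.2 (d.getD p.2 0 + 1)) indeg0
  let queue := step_ids.filter (fun sid => indeg.getD sid 0 == 0)
  let level := step_ids.foldl (fun d sid => d.insert sid (0 : Int)) PySem.Dict.empty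
  let r := kahnLoop succ (step_ids.length + edges.length + 1) queue indeg level 0
  if r.2 ≠ (step_ids.length : Int) then [] else r.1.items

-- successors of curr, in edge order (what A's succ dict holds at curr)

-- ===== PORT B =====
-- one 'for src, dst in edges' relaxation round, with its 'changed' flag

def bfRound (edges : List (Int × Int)) (lv : PySem.Dict Int Int) : PySem.Dict Int Int × Bool :=
  edges.foldl (fun st p =>
    if st.1.getD p.1 0 + 1 > st.1.getD p.2 0 then (st.1.insert p.2 (st.1.getD p.1 0 + 1), true) else st)
    (lv, false)

-- B's 'for _ in range(len(step_ids))' loop, exiting early after an unchanged round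

def bfLoop (edges : List (Int × Int)) : Nat → PySem.Dict Int Int → PySem.Dict Int Int
  | 0, lv => lv
  | fuel + 1, lv =>
      let r := bfRound edges lv
      if r.2 then bfLoop edges fuel r.1 else r.1

-- the same fold as bfRound, from an arbitrary state (for the loop invariants)

def topological_levels_alt (step_ids : List Int) (edges : List (Int × Int)) : List (Int × Int) :=
  let level0 := step_ids.foldl (fun d sid => d.insert sid 0) PySem.Dict.empty
  let lv := bfLoop edges step_ids.length level0
  if edges.any (fun p => lv.getD p.1 0 + 1 > lv.getD p.2 0) then [] else lv.items

-- ===== PRECONDITION & SPEC =====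
-- reachb edges f u v: there is an edge path of length between 1 and f from u to v

def reachb (edges : List (Int × Int)) : Nat → Int → Int → Bool
  | 0, _, _ => false
  | f + 1, u, v => edges.any (fun p => p.1 == u && (p.2 == v || reachb edges f p.2 v))

-- Pre_ excludes the inputs on which A raises (an edge endpoint outside step_ids — unless masked
-- by a duplicate id — or a cycle: KeyError/ValueError) and inputs with duplicate step_ids, on
-- which A's per-occurrence visited counting is accidental (a duplicate source can mask a dangling edge).
def Pre_topological_levels (step_ids : List Int) (edges : List (Int × Int)) : Prop :=
  step_ids.Nodup ∧ (∀ p ∈ edges, p.1 ∈ step_ids ∧ p.2 ∈ step_ids) ∧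
    ∀ v ∈ step_ids, reachb edges step_ids.length v v = false
instance (step_ids : List Int) (edges : List (Int × Int)) : Decidable (Pre_topological_levels step_ids edges) := by
  unfold Pre_topological_levels; infer_instance

def pvWitness_topological_levels : List Int × (List (Int × Int)) :=
  ([1, 2, 3, 4], [(1, 2), (2, 3), (1, 3), (3, 4)])

def Spec_topological_levels (step_ids : List Int) (edges : List (Int × Int)) (out : List (Int × Int)) : Prop := out = topological_levels_alt step_ids edges
instance (step_ids : List Int) (edges : List (Int × Int)) (out : List (Int × Int)) : Decidable (Spec_topological_levels step_ids edges out) := by unfold Spec_topological_levels; infer_instance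

-- ===== CLAIM (what is proved, stated in full; the proofs are below) =====
def Claim_equal_topological_levels : Prop := ∀ (step_ids : List Int) (edges : List (Int × Int)), Dom_topological_levels step_ids edges → Pre_topological_levels step_ids edges → Spec_topological_levels step_ids edges (topological_levels step_ids edges)

-- ===== LEMMAS AND PROOFS =====

def preds (edges : List (Int × Int)) (v : Int) : List Int :=
  (edges.filter (fun p => p.2 == v)).map Prod.fst

def lpv (edges : List (Int × Int)) : Nat → Int → Int
  | 0, _ => 0
  | f + 1, v => (preds edges v).foldl (fun a u => max a (lpv edges f u + 1)) 0

lemma foldl_max_le {α : Type} (l : List α) (f : α → Int) (c init : Int)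
    (h0 : init ≤ c) (h : ∀ u ∈ l, f u ≤ c) :
    l.foldl (fun a u => max a (f u)) init ≤ c := by
  induction l generalizing init with
  | nil => exact h0
  | cons x t ih =>
      exact ih _ (max_le h0 (h x (by simp))) (fun u hu => h u (by simp [hu]))

lemma lpv_nonneg (edges : List (Int × Int)) (f : Nat) (v : Int) : 0 ≤ lpv edges f v := by
  cases f with
  | zero => simp [lpv]
  | succ f => exact (PySem.List.le_foldl_max_int (preds edges v) (fun u => lpv edges f u + 1) 0).1

lemma lpv_le_of_forall (edges : List (Int × Int)) (f : Nat) (v : Int) (c : Int)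
    (h0 : 0 ≤ c) (h : ∀ u ∈ preds edges v, lpv edges f u + 1 ≤ c) : lpv edges (f + 1) v ≤ c :=
  foldl_max_le _ _ _ _ h0 h

lemma le_lpv_of_mem (edges : List (Int × Int)) (f : Nat) (v u : Int) (hu : u ∈ preds edges v) :
    lpv edges f u + 1 ≤ lpv edges (f + 1) v :=
  (PySem.List.le_foldl_max_int (preds edges v) (fun u => lpv edges f u + 1) 0).2 u hu

lemma lpv_succ_mono (edges : List (Int × Int)) : ∀ f v, lpv edges f v ≤ lpv edges (f + 1) v := by
  intro f
  induction f with
  | zero => intro v; exact lpv_nonneg edges 1 v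
  | succ g ih =>
      intro v
      apply lpv_le_of_forall _ _ _ _ (lpv_nonneg _ _ _)
      intro u hu
      have := le_lpv_of_mem edges (g+1) v u hu
      have h2 := ih u
      omega

lemma lpv_mono (edges : List (Int × Int)) {f g : Nat} (h : f ≤ g) (v : Int) :
    lpv edges f v ≤ lpv edges g v := by
  induction g with
  | zero => simp_all
  | succ g ih =>
      rcases Nat.lt_or_ge f (g+1) with h'|h'
      · exact le_trans (ih (by omega)) (lpv_succ_mono edges g v)
      · have : f = g + 1 := by omega
        simp [this]

lemma reachb_mono (edges : List (Int × Int)) : ∀ {f g : Nat}, f ≤ g → ∀ u v,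
    reachb edges f u v = true → reachb edges g u v = true := by
  intro f
  induction f with
  | zero => intro g _ u v h; simp [reachb] at h
  | succ f ih =>
      intro g hg u v h
      obtain ⟨g', rfl⟩ : ∃ g', g = g' + 1 := ⟨g - 1, by omega⟩
      simp only [reachb, List.any_eq_true] at h ⊢
      obtain ⟨p, hp, hcond⟩ := h
      refine ⟨p, hp, ?_⟩
      simp only [Bool.and_eq_true, Bool.or_eq_true] at hcond ⊢
      rcases hcond with ⟨h1, h2|h2⟩
      · exact ⟨h1, Or.inl h2⟩
      · exact ⟨h1, Or.inr (ih (by omega) _ _ h2)⟩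

lemma lpv_descend (edges : List (Int × Int)) (g : Nat) (v : Int)
    (h : lpv edges (g + 2) v > lpv edges (g + 1) v) :
    ∃ u ∈ preds edges v, lpv edges (g + 1) u > lpv edges g u := by
  by_contra hc
  push Not at hc
  have : lpv edges (g + 2) v ≤ lpv edges (g + 1) v := by
    apply lpv_le_of_forall _ _ _ _ (lpv_nonneg _ _ _)
    intro u hu
    have h1 := hc u hu
    have h2 := le_lpv_of_mem edges g v u hu
    omega
  omega

lemma mem_preds_iff (edges : List (Int × Int)) (u v : Int) :
    u ∈ preds edges v ↔ (u, v) ∈ edges := by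
  simp only [preds, List.mem_map, List.mem_filter, beq_iff_eq]
  constructor
  · rintro ⟨⟨a,b⟩, ⟨hm, he⟩, rfl⟩; simpa using he ▸ hm
  · intro h; exact ⟨(u,v), ⟨h, rfl⟩, rfl⟩

lemma exists_chain (edges : List (Int × Int)) : ∀ (k : Nat) (v : Int),
    lpv edges (k + 1) v > lpv edges k v →
    ∃ c : List Int, c.length = k + 1 ∧ c.head? = some v ∧
      List.IsChain (fun a b => (b, a) ∈ edges) c ∧ (∀ x ∈ c.tail, ∃ p ∈ edges, p.1 = x) := by
  intro k
  induction k with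
  | zero =>
      intro v _
      exact ⟨[v], rfl, rfl, List.isChain_singleton v, by simp⟩
  | succ k ih =>
      intro v h
      obtain ⟨u, hu, hlt⟩ := lpv_descend edges k v h
      obtain ⟨c', hlen, hhead, hchain, htail⟩ := ih u hlt
      obtain ⟨a, t, rfl⟩ : ∃ a t, c' = a :: t := by
        cases c' with
        | nil => simp at hhead
        | cons a b => exact ⟨a, b, rfl⟩
      have ha : a = u := by simpa using hhead
      subst ha
      refine ⟨v :: a :: t, by simpa using hlen, rfl, ?_, ?_⟩
      · exact (List.isChain_cons_cons).2 ⟨(mem_preds_iff edges a v).1 hu, hchain⟩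
      · intro x hx
        rcases List.mem_cons.1 hx with rfl | hx'
        · exact ⟨(x, v), (mem_preds_iff edges x v).1 hu, rfl⟩
        · exact htail x hx'

lemma chain_reach (edges : List (Int × Int)) (cs : List Int)
    (hchain : List.IsChain (fun a b => (b, a) ∈ edges) cs) :
    ∀ (d i : Nat), 0 < d → ∀ (hij : i + d < cs.length),
      reachb edges d (cs[i + d]'hij) (cs[i]'(by omega)) = true := by
  intro d
  induction d with
  | zero => omega
  | succ d ih =>
      intro i _ hij
      have hedge : ∀ (j : Nat) (h : j + 1 < cs.length), (cs[j + 1]'h, cs[j]'(by omega)) ∈ edges :=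
        fun j h => List.isChain_iff_getElem.1 hchain j h
      rw [show reachb edges (d + 1) = fun u v => edges.any (fun p => p.1 == u && (p.2 == v || reachb edges d p.2 v)) from rfl]
      simp only [List.any_eq_true]
      cases d with
      | zero =>
          exact ⟨(cs[i + 1]'hij, cs[i]'(by omega)), hedge i hij, by simp [reachb]⟩
      | succ d' =>
          refine ⟨(cs[i + (d' + 2)]'hij, cs[i + (d' + 1)]'(by omega)), hedge (i + (d' + 1)) (by omega), ?_⟩
          simp only [Bool.and_eq_true, beq_self_eq_true, Bool.or_eq_true, true_and]
          exact Or.inr (ih i (by omega) (by omega))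

lemma nodup_length_le (l s : List Int) (h1 : l.Nodup) (h2 : l ⊆ s) : l.length ≤ s.length := by
  classical
  calc l.length = l.toFinset.card := (List.toFinset_card_of_nodup h1).symm
  _ ≤ s.toFinset.card := Finset.card_le_card (by intro x hx; simp only [List.mem_toFinset] at *; exact h2 hx)
  _ ≤ s.length := s.toFinset_card_le

lemma exists_dup_idx (l : List Int) (h : ¬ l.Nodup) :
    ∃ (i j : Nat) (hi : i < l.length) (hj : j < l.length), i < j ∧ l[i] = l[j] := by
  rw [List.nodup_iff_injective_get] at h
  simp only [Function.Injective] at h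
  push Not at h
  obtain ⟨a, b, hab, hne⟩ := h
  rcases Nat.lt_or_ge a.1 b.1 with hl|hl
  · exact ⟨a.1, b.1, a.2, b.2, hl, by simpa [List.get_eq_getElem] using hab⟩
  · have : b.1 < a.1 := by
      rcases Nat.lt_or_ge b.1 a.1 with h'|h'
      · exact h'
      · exact absurd (Fin.ext (by omega)) hne
    exact ⟨b.1, a.1, b.2, a.2, this, by simpa [List.get_eq_getElem] using hab.symm⟩

lemma lpv_stab (step_ids : List Int) (edges : List (Int × Int))
    (hcl : ∀ p ∈ edges, p.1 ∈ step_ids ∧ p.2 ∈ step_ids)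
    (hac : ∀ v ∈ step_ids, reachb edges step_ids.length v v = false)
    (v : Int) (hv : v ∈ step_ids) :
    lpv edges (step_ids.length + 1) v = lpv edges step_ids.length v := by
  set n := step_ids.length with hn
  by_contra hne
  have hgt : lpv edges (n + 1) v > lpv edges n v :=
    lt_of_le_of_ne (lpv_mono edges (by omega) v) (Ne.symm hne)
  obtain ⟨cs, hlen, hhead, hchain, htail⟩ := exists_chain edges n v hgt
  have hsub : cs ⊆ step_ids := by
    intro x hx
    obtain ⟨a, t, rfl⟩ : ∃ a t, cs = a :: t := by
      cases cs with
      | nil => simp at hhead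
      | cons a b => exact ⟨a, b, rfl⟩
    have ha : a = v := by simpa using hhead
    rcases List.mem_cons.1 hx with rfl | hx'
    · exact ha ▸ hv
    · obtain ⟨p, hp, hp1⟩ := htail x hx'
      exact hp1 ▸ (hcl p hp).1
  have hnodup : ¬ cs.Nodup := by
    intro hcn
    have := nodup_length_le cs step_ids hcn hsub
    omega
  obtain ⟨i, j, hi, hj, hij, heq⟩ := exists_dup_idx cs hnodup
  have hr : reachb edges (j - i) (cs[i + (j - i)]'(by omega)) (cs[i]'(by omega)) = true :=
    chain_reach edges cs hchain (j - i) i (by omega) (by omega)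
  have hij' : i + (j - i) = j := by omega
  have hr2 : reachb edges (j - i) (cs[j]'hj) (cs[j]'hj) = true := by
    have h1 : cs[i + (j - i)]'(by omega) = cs[j]'hj := by
      congr 1
    rw [h1] at hr
    have h2 : cs[i]'(by omega) = cs[j]'hj := heq
    rwa [h2] at hr
  have hrn : reachb edges n (cs[j]'hj) (cs[j]'hj) = true :=
    reachb_mono edges (by omega) _ _ hr2
  have hmem : cs[j]'hj ∈ step_ids := hsub (List.getElem_mem hj)
  have := hac _ hmem
  rw [hn] at hrn
  simp_all

def roundFold (es : List (Int × Int)) (st : PySem.Dict Int Int × Bool) : PySem.Dict Int Int × Bool :=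
  es.foldl (fun st p =>
    if st.1.getD p.1 0 + 1 > st.1.getD p.2 0 then (st.1.insert p.2 (st.1.getD p.1 0 + 1), true) else st) st

lemma bfRound_eq_roundFold (edges : List (Int × Int)) (lv : PySem.Dict Int Int) :
    bfRound edges lv = roundFold edges (lv, false) := rfl

lemma roundFold_cons (p : Int × Int) (es : List (Int × Int)) (st : PySem.Dict Int Int × Bool) :
    roundFold (p :: es) st = roundFold es
      (if st.1.getD p.1 0 + 1 > st.1.getD p.2 0 then (st.1.insert p.2 (st.1.getD p.1 0 + 1), true) else st) := by
  simp [roundFold, List.foldl_cons]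

lemma roundFold_step_mono (p : Int × Int) (st : PySem.Dict Int Int × Bool) (v : Int) :
    st.1.getD v 0 ≤ (if st.1.getD p.1 0 + 1 > st.1.getD p.2 0 then (st.1.insert p.2 (st.1.getD p.1 0 + 1), true) else st).1.getD v 0 := by
  split_ifs with h
  · simp only [PySem.Dict.getD_insert]
    split_ifs with h2
    · subst h2; omega
    · exact le_refl _
  · exact le_refl _

lemma roundFold_mono (es : List (Int × Int)) : ∀ (st : PySem.Dict Int Int × Bool) (v : Int),
    st.1.getD v 0 ≤ (roundFold es st).1.getD v 0 := by
  induction es with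
  | nil => intro st v; simp [roundFold]
  | cons p t ih =>
      intro st v
      rw [roundFold_cons]
      exact le_trans (roundFold_step_mono p st v) (ih _ v)

lemma roundFold_edge (es : List (Int × Int)) : ∀ (st : PySem.Dict Int Int × Bool) (p : Int × Int), p ∈ es →
    st.1.getD p.1 0 + 1 ≤ (roundFold es st).1.getD p.2 0 := by
  induction es with
  | nil => simp
  | cons q t ih =>
      intro st p hp
      rw [roundFold_cons]
      rcases List.mem_cons.1 hp with rfl | hp'
      · refine le_trans ?_ (roundFold_mono t _ p.2)
        split_ifs with h
        · simp
        · omega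
      · exact le_trans (by
          have := roundFold_step_mono q st p.1
          omega) (ih _ p hp')

lemma roundFold_flag_mono (es : List (Int × Int)) : ∀ (lv : PySem.Dict Int Int),
    (roundFold es (lv, true)).2 = true := by
  induction es with
  | nil => intro lv; simp [roundFold]
  | cons q t ih =>
      intro lv
      rw [roundFold_cons]
      split_ifs <;> exact ih _

lemma roundFold_flag_false (es : List (Int × Int)) : ∀ (lv : PySem.Dict Int Int),
    (roundFold es (lv, false)).2 = false →
    (roundFold es (lv, false)).1 = lv ∧ ∀ p ∈ es, lv.getD p.1 0 + 1 ≤ lv.getD p.2 0 := by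
  induction es with
  | nil => intro lv _; exact ⟨by simp [roundFold], by simp⟩
  | cons q t ih =>
      intro lv hflag
      rw [roundFold_cons] at hflag ⊢
      by_cases h : lv.getD q.1 0 + 1 > lv.getD q.2 0
      · simp only [if_pos h] at hflag
        rw [roundFold_flag_mono] at hflag
        exact absurd hflag (by simp)
      · simp only [if_neg h] at hflag ⊢
        obtain ⟨h1, h2⟩ := ih lv hflag
        refine ⟨h1, ?_⟩
        intro p hp
        rcases List.mem_cons.1 hp with rfl | hp'
        · omega
        · exact h2 p hp'

lemma roundFold_ub (step_ids : List Int) (L : Int → Int)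
    (es : List (Int × Int)) (hes : ∀ p ∈ es, p.1 ∈ step_ids ∧ p.2 ∈ step_ids)
    (hL1 : ∀ p ∈ es, L p.1 + 1 ≤ L p.2) :
    ∀ st : PySem.Dict Int Int × Bool, (∀ v ∈ step_ids, st.1.getD v 0 ≤ L v) →
      ∀ v ∈ step_ids, (roundFold es st).1.getD v 0 ≤ L v := by
  induction es with
  | nil => intro st h v hv; simpa [roundFold] using h v hv
  | cons q t ih =>
      intro st h v hv
      rw [roundFold_cons]
      refine ih (fun p hp => hes p (by simp [hp])) (fun p hp => hL1 p (by simp [hp])) _ ?_ v hv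
      intro w hw
      split_ifs with hq
      · simp only [PySem.Dict.getD_insert]
        split_ifs with h2
        · subst h2
          have := h q.1 (hes q (by simp)).1
          have := hL1 q (by simp)
          omega
        · exact h w hw
      · exact h w hw

lemma roundFold_keys (step_ids : List Int) (es : List (Int × Int))
    (hes : ∀ p ∈ es, p.2 ∈ step_ids) :
    ∀ st : PySem.Dict Int Int × Bool, st.1.keys = step_ids → (roundFold es st).1.keys = step_ids := by
  induction es with
  | nil => intro st h; simpa [roundFold] using h
  | cons q t ih =>
      intro st h
      rw [roundFold_cons]
      refine ih (fun p hp => hes p (by simp [hp])) _ ?_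
      split_ifs with hq
      · simp only []
        rw [PySem.Dict.keys_insert_of_contains]
        · exact h
        · rw [PySem.Dict.contains_iff_mem_keys, h]
          exact hes q (by simp)
      · exact h

lemma round_lb (step_ids : List Int) (edges : List (Int × Int))
    (hcl : ∀ p ∈ edges, p.1 ∈ step_ids ∧ p.2 ∈ step_ids)
    (k : Nat) (lv : PySem.Dict Int Int)
    (hlb : ∀ v ∈ step_ids, lpv edges k v ≤ lv.getD v 0) :
    ∀ v ∈ step_ids, lpv edges (k + 1) v ≤ (roundFold edges (lv, false)).1.getD v 0 := by
  intro v hv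
  apply lpv_le_of_forall
  · exact le_trans (le_trans (lpv_nonneg edges k v) (hlb v hv)) (roundFold_mono edges (lv, false) v)
  · intro u hu
    have hedge : (u, v) ∈ edges := (mem_preds_iff edges u v).1 hu
    have h1 : lv.getD u 0 + 1 ≤ (roundFold edges (lv, false)).1.getD v 0 :=
      roundFold_edge edges (lv, false) (u, v) hedge
    have h2 : lpv edges k u ≤ lv.getD u 0 := hlb u (hcl (u, v) hedge).1
    omega

lemma fix_ge (step_ids : List Int) (edges : List (Int × Int))
    (hcl : ∀ p ∈ edges, p.1 ∈ step_ids ∧ p.2 ∈ step_ids)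
    (lv : PySem.Dict Int Int)
    (hfix : ∀ p ∈ edges, lv.getD p.1 0 + 1 ≤ lv.getD p.2 0)
    (hnn : ∀ v ∈ step_ids, 0 ≤ lv.getD v 0) :
    ∀ (f : Nat), ∀ v ∈ step_ids, lpv edges f v ≤ lv.getD v 0 := by
  intro f
  induction f with
  | zero => intro v hv; simpa [lpv] using hnn v hv
  | succ f ih =>
      intro v hv
      apply lpv_le_of_forall _ _ _ _ (hnn v hv)
      intro u hu
      have hedge : (u, v) ∈ edges := (mem_preds_iff edges u v).1 hu
      have h3 := ih u (hcl (u, v) hedge).1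
      have h4 : lv.getD u 0 + 1 ≤ lv.getD v 0 := hfix (u, v) hedge
      omega

lemma bfLoop_correct (step_ids : List Int) (edges : List (Int × Int))
    (hcl : ∀ p ∈ edges, p.1 ∈ step_ids ∧ p.2 ∈ step_ids)
    (hL1 : ∀ p ∈ edges, lpv edges step_ids.length p.1 + 1 ≤ lpv edges step_ids.length p.2) :
    ∀ (fuel : Nat) (lv : PySem.Dict Int Int), fuel ≤ step_ids.length →
      lv.keys = step_ids →
      (∀ v ∈ step_ids, lv.getD v 0 ≤ lpv edges step_ids.length v) →
      (∀ v ∈ step_ids, lpv edges (step_ids.length - fuel) v ≤ lv.getD v 0) →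
      (bfLoop edges fuel lv).keys = step_ids ∧
        ∀ v ∈ step_ids, (bfLoop edges fuel lv).getD v 0 = lpv edges step_ids.length v := by
  intro fuel
  induction fuel with
  | zero =>
      intro lv _ hkeys hub hlb
      simp only [bfLoop]
      exact ⟨hkeys, fun v hv => le_antisymm (hub v hv) (by simpa using hlb v hv)⟩
  | succ fuel ih =>
      intro lv hle hkeys hub hlb
      simp only [bfLoop, bfRound_eq_roundFold]
      by_cases hflag : (roundFold edges (lv, false)).2 = true
      · rw [if_pos hflag]
        apply ih ((roundFold edges (lv, false)).1) (by omega)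
        · exact roundFold_keys step_ids edges (fun p hp => (hcl p hp).2) _ hkeys
        · exact roundFold_ub step_ids _ edges hcl hL1 _ hub
        · intro v hv
          have := round_lb step_ids edges hcl (step_ids.length - (fuel + 1)) lv hlb v hv
          have heq : step_ids.length - (fuel + 1) + 1 = step_ids.length - fuel := by omega
          rwa [heq] at this
      · rw [if_neg hflag]
        obtain ⟨heq, hfix⟩ := roundFold_flag_false edges lv (by simpa using hflag)
        rw [heq]
        refine ⟨hkeys, fun v hv => le_antisymm (hub v hv) ?_⟩
        apply fix_ge step_ids edges hcl lv hfix _ _ v hv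
        intro w hw
        exact le_trans (lpv_nonneg edges _ w) (hlb w hw)

lemma dinit_getD (l : List Int) (v : Int) :
    (l.foldl (fun d sid => d.insert sid (0 : Int)) PySem.Dict.empty).getD v 0 = 0 := by
  suffices h : ∀ d : PySem.Dict Int Int, (∀ w, d.getD w 0 = 0) →
      ∀ w, (l.foldl (fun d sid => d.insert sid (0 : Int)) d).getD w 0 = 0 by
    exact h PySem.Dict.empty (fun w => by simp) v
  induction l with
  | nil => intro d h w; simpa using h w
  | cons x t ih =>
      intro d h w
      refine ih _ ?_ w
      intro u
      rw [PySem.Dict.getD_insert]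
      split_ifs <;> simp [h u]

lemma dinit_keys (l : List Int) (hnd : l.Nodup) :
    (l.foldl (fun d sid => d.insert sid (0 : Int)) PySem.Dict.empty).keys = l := by
  rw [PySem.Dict.keys_foldl_insert]
  simp only [PySem.Dict.keys_empty]
  have : PySem.Set.update ([] : List Int) l = PySem.Set.ofList l := rfl
  rw [this, PySem.Set.ofList_eq_self_of_nodup l hnd]

lemma hL1_of_pre (step_ids : List Int) (edges : List (Int × Int))
    (hcl : ∀ p ∈ edges, p.1 ∈ step_ids ∧ p.2 ∈ step_ids)
    (hac : ∀ v ∈ step_ids, reachb edges step_ids.length v v = false) :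
    ∀ p ∈ edges, lpv edges step_ids.length p.1 + 1 ≤ lpv edges step_ids.length p.2 := by
  intro p hp
  have h1 : lpv edges step_ids.length p.1 + 1 ≤ lpv edges (step_ids.length + 1) p.2 :=
    le_lpv_of_mem edges step_ids.length p.2 p.1 ((mem_preds_iff edges p.1 p.2).2 hp)
  rwa [lpv_stab step_ids edges hcl hac p.2 (hcl p hp).2] at h1

lemma alt_result (step_ids : List Int) (edges : List (Int × Int))
    (hnd : step_ids.Nodup)
    (hcl : ∀ p ∈ edges, p.1 ∈ step_ids ∧ p.2 ∈ step_ids)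
    (hac : ∀ v ∈ step_ids, reachb edges step_ids.length v v = false) :
    topological_levels_alt step_ids edges =
      step_ids.map (fun v => (v, lpv edges step_ids.length v)) := by
  have hL1 := hL1_of_pre step_ids edges hcl hac
  obtain ⟨hkeys, hval⟩ := bfLoop_correct step_ids edges hcl hL1 step_ids.length
    (step_ids.foldl (fun d sid => d.insert sid 0) PySem.Dict.empty) (le_refl _)
    (dinit_keys step_ids hnd)
    (fun v hv => by rw [dinit_getD]; exact lpv_nonneg edges _ v)
    (fun v hv => by rw [dinit_getD]; simp [lpv])
  unfold topological_levels_alt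
  simp only []
  rw [if_neg]
  · rw [PySem.Dict.items_eq_map_keys _ (by rw [hkeys]; exact hnd) 0, hkeys]
    exact List.map_congr_left (fun v hv => by rw [hval v hv])
  · simp only [List.any_eq_true, not_exists, not_and]
    intro p hp
    rw [hval p.1 (hcl p hp).1, hval p.2 (hcl p hp).2]
    have := hL1 p hp
    simp only [decide_eq_true_eq]
    omega

def succList (edges : List (Int × Int)) (curr : Int) : List Int :=
  (edges.filter (fun p => p.1 == curr)).map Prod.snd

lemma succ_dict_getD (edges : List (Int × Int)) (curr : Int) :
    (edges.foldl (fun d p => d.modify p.1 [] (· ++ [p.2])) PySem.Dict.empty).getD curr [] =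
      succList edges curr := by
  rw [PySem.Dict.getD_foldl_modify_append]
  simp [succList]

lemma mem_succList_iff (edges : List (Int × Int)) (curr v : Int) :
    v ∈ succList edges curr ↔ (curr, v) ∈ edges := by
  simp only [succList, List.mem_map, List.mem_filter, beq_iff_eq]
  constructor
  · rintro ⟨⟨a,b⟩, ⟨hm, he⟩, rfl⟩; simpa using he ▸ hm
  · intro h; exact ⟨(curr, v), ⟨h, rfl⟩, rfl⟩

-- number of in-edges of v from sources not yet popped

def inCnt (edges : List (Int × Int)) (P : List Int) (v : Int) : Int :=
  ((edges.filter (fun p => p.2 == v && !(P.contains p.1))).length : Int)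

lemma countP_split {α : Type} (l : List α) (q1 q3 : α → Bool)
    (hdisj : ∀ x ∈ l, ¬(q1 x = true ∧ q3 x = true)) :
    l.countP (fun x => q1 x || q3 x) = l.countP q1 + l.countP q3 := by
  induction l with
  | nil => simp
  | cons a t ih =>
      rw [List.countP_cons, List.countP_cons, List.countP_cons,
        ih (fun x hx => hdisj x (by simp [hx]))]
      have := hdisj a (by simp)
      by_cases h1 : q1 a = true <;> by_cases h3 : q3 a = true <;> simp_all <;> omega

lemma succCount_eq (edges : List (Int × Int)) (curr v : Int) :
    (succList edges curr).count v = edges.countP (fun p => p.2 == v && p.1 == curr) := by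
  unfold succList
  rw [List.count_eq_countP, List.countP_map, List.countP_filter]
  apply List.countP_congr
  intro x _
  simp only [Function.comp, Bool.and_eq_true, beq_iff_eq]

lemma inCnt_eq_countP (edges : List (Int × Int)) (P : List Int) (v : Int) :
    inCnt edges P v = (edges.countP (fun p => p.2 == v && !(P.contains p.1)) : Int) := by
  simp [inCnt, ← List.countP_eq_length_filter]

lemma inCnt_ge_succ_count (edges : List (Int × Int)) (P : List Int) (curr v : Int)
    (hPc : curr ∉ P) :
    ((succList edges curr).count v : Int) ≤ inCnt edges P v := by
  rw [succCount_eq, inCnt_eq_countP]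
  have h : ∀ x ∈ edges, (x.2 == v && x.1 == curr) = true →
      (x.2 == v && !(P.contains x.1)) = true := by
    intro x _ h
    simp only [Bool.and_eq_true, beq_iff_eq] at h
    simp only [Bool.and_eq_true, Bool.not_eq_true', h.1, beq_self_eq_true, true_and]
    rw [h.2]
    cases hcp : List.contains P curr
    · rfl
    · exact absurd (by simpa using hcp) hPc
  exact_mod_cast List.countP_mono_left h

lemma inCnt_append (edges : List (Int × Int)) (P : List Int) (curr v : Int) (hPc : curr ∉ P) :
    inCnt edges (P ++ [curr]) v = inCnt edges P v - ((succList edges curr).count v : Int) := by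
  rw [succCount_eq, inCnt_eq_countP, inCnt_eq_countP]
  have hsplit : edges.countP (fun p => p.2 == v && !(P.contains p.1)) =
      edges.countP (fun p => p.2 == v && !((P ++ [curr]).contains p.1)) +
      edges.countP (fun p => p.2 == v && p.1 == curr) := by
    rw [← countP_split edges _ _ ?hd]
    · apply List.countP_congr
      intro x _
      by_cases h2 : x.2 = v <;> by_cases h1 : x.1 = curr <;>
        simp [h1, h2, hPc]
    case hd =>
      intro x _
      rintro ⟨ha, hb⟩
      simp only [Bool.and_eq_true, Bool.not_eq_true', beq_iff_eq] at ha hb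
      have := ha.2
      rw [List.contains_append] at this
      simp [hb.2] at this
  omega

-- the level A's dict holds for v after popping exactly the nodes of P

def lev (edges : List (Int × Int)) (n : Nat) (P : List Int) (v : Int) : Int :=
  ((preds edges v).filter (fun u => P.contains u)).foldl
    (fun a u => max a (lpv edges n u + 1)) 0

lemma lev_nonneg (edges : List (Int × Int)) (n : Nat) (P : List Int) (v : Int) :
    0 ≤ lev edges n P v :=
  (PySem.List.le_foldl_max_int _ _ 0).1

lemma le_lev (edges : List (Int × Int)) (n : Nat) (P : List Int) (v u : Int)
    (hu : u ∈ preds edges v) (huP : u ∈ P) :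
    lpv edges n u + 1 ≤ lev edges n P v :=
  (PySem.List.le_foldl_max_int _ _ 0).2 u (List.mem_filter.2 ⟨hu, by simpa using huP⟩)

lemma lev_le (edges : List (Int × Int)) (n : Nat) (P : List Int) (v : Int) (c : Int)
    (h0 : 0 ≤ c) (h : ∀ u ∈ preds edges v, u ∈ P → lpv edges n u + 1 ≤ c) :
    lev edges n P v ≤ c := by
  apply foldl_max_le _ _ _ _ h0
  intro u hu
  rcases List.mem_filter.1 hu with ⟨h1, h2⟩
  exact h u h1 (by simpa using h2)

lemma lev_nil (edges : List (Int × Int)) (n : Nat) (v : Int) : lev edges n [] v = 0 := by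
  simp [lev]

lemma lev_full (edges : List (Int × Int)) (n : Nat) (P : List Int) (v : Int)
    (h : ∀ u ∈ preds edges v, u ∈ P) :
    lev edges n P v = lpv edges (n + 1) v := by
  unfold lev
  rw [List.filter_eq_self.2 (fun u hu => by simpa using h u hu)]
  rfl

lemma lev_append (edges : List (Int × Int)) (n : Nat) (P : List Int) (curr v : Int)
    (hPc : curr ∉ P) :
    lev edges n (P ++ [curr]) v =
      if (curr, v) ∈ edges then max (lev edges n P v) (lpv edges n curr + 1)
      else lev edges n P v := by
  split_ifs with hcv
  · apply le_antisymm
    · apply lev_le _ _ _ _ _ (le_trans (lev_nonneg _ _ _ _) (le_max_left _ _))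
      intro u hu huP
      rcases List.mem_append.1 huP with h | h
      · exact le_trans (le_lev edges n P v u hu h) (le_max_left _ _)
      · have : u = curr := by simpa using h
        subst this
        exact le_max_right _ _
    · apply max_le
      · apply lev_le _ _ _ _ _ (lev_nonneg _ _ _ _)
        intro u hu huP
        exact le_lev edges n (P ++ [curr]) v u hu (List.mem_append.2 (Or.inl huP))
      · exact le_lev edges n (P ++ [curr]) v curr ((mem_preds_iff edges curr v).2 hcv)
          (List.mem_append.2 (Or.inr (by simp)))
  · apply le_antisymm
    · apply lev_le _ _ _ _ _ (lev_nonneg _ _ _ _)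
      intro u hu huP
      rcases List.mem_append.1 huP with h | h
      · exact le_lev edges n P v u hu h
      · have : u = curr := by simpa using h
        subst this
        exact absurd ((mem_preds_iff edges u v).1 hu) hcv
    · apply lev_le _ _ _ _ _ (lev_nonneg _ _ _ _)
      intro u hu huP
      exact le_lev edges n (P ++ [curr]) v u hu (List.mem_append.2 (Or.inl huP))

lemma preds_subset_of_inCnt_zero (edges : List (Int × Int)) (P : List Int) (v : Int)
    (h : inCnt edges P v = 0) : ∀ u ∈ preds edges v, u ∈ P := by
  intro u hu
  by_contra huP
  have hmem : (u, v) ∈ edges.filter (fun p => p.2 == v && !(P.contains p.1)) := by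
    apply List.mem_filter.2
    refine ⟨(mem_preds_iff edges u v).1 hu, ?_⟩
    simp only [Bool.and_eq_true, beq_self_eq_true, true_and, Bool.not_eq_true']
    cases hc : List.contains P u
    · rfl
    · exact absurd (by simpa using hc) huP
  have : 0 < (edges.filter (fun p => p.2 == v && !(P.contains p.1))).length :=
    List.length_pos_iff.2 (List.ne_nil_of_mem hmem)
  unfold inCnt at h
  omega

lemma inner_fold (step_ids : List Int) (edges : List (Int × Int)) (curr : Int) (P rest : List Int)
    (hcl : ∀ p ∈ edges, p.1 ∈ step_ids ∧ p.2 ∈ step_ids)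
    (hPc : curr ∉ P)
    (hnsl : curr ∉ succList edges curr)
    (hcs : curr ∈ step_ids)
    (hlevc : lev edges step_ids.length P curr = lpv edges step_ids.length curr)
    (hrest : ∀ v ∈ rest, inCnt edges P v = 0) :
    ∀ (todo done : List Int) (lv ind : PySem.Dict Int Int) (q : List Int),
    done ++ todo = succList edges curr →
    lv.keys = step_ids →
    (∀ v ∈ step_ids, lv.getD v 0 = if v ∈ done then max (lev edges step_ids.length P v) (lpv edges step_ids.length curr + 1) else lev edges step_ids.length P v) →
    (∀ v ∈ step_ids, ind.getD v 0 = inCnt edges P v - (done.count v : Int)) →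
    q.Nodup →
    (∀ v : Int, v ∈ q ↔ (v ∈ rest ∨ (v ∈ done ∧ inCnt edges P v - (done.count v : Int) = 0))) →
    ((todo.foldl (kahnStep curr) (lv, ind, q)).1.keys = step_ids ∧
     (∀ v ∈ step_ids, (todo.foldl (kahnStep curr) (lv, ind, q)).1.getD v 0 =
        if v ∈ succList edges curr then max (lev edges step_ids.length P v) (lpv edges step_ids.length curr + 1) else lev edges step_ids.length P v) ∧
     (∀ v ∈ step_ids, (todo.foldl (kahnStep curr) (lv, ind, q)).2.1.getD v 0 =
        inCnt edges P v - (((succList edges curr).count v : Nat) : Int)) ∧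
     (todo.foldl (kahnStep curr) (lv, ind, q)).2.2.Nodup ∧
     (∀ v : Int, v ∈ (todo.foldl (kahnStep curr) (lv, ind, q)).2.2 ↔
        (v ∈ rest ∨ (v ∈ succList edges curr ∧ inCnt edges P v - (((succList edges curr).count v : Nat) : Int) = 0)))) := by
  intro todo
  induction todo with
  | nil =>
      intro done lv ind q hsplit hkeys hlv hind hqnd hq
      have hdone : done = succList edges curr := by simpa using hsplit
      subst hdone
      exact ⟨hkeys, hlv, hind, hqnd, hq⟩
  | cons x t ih =>
      intro done lv ind q hsplit hkeys hlv hind hqnd hq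
      have hxs : x ∈ succList edges curr := by
        rw [← hsplit]; simp
      have hxstep : x ∈ step_ids := (hcl (curr, x) ((mem_succList_iff edges curr x).1 hxs)).2
      have hxc : x ≠ curr := fun h => hnsl (h ▸ hxs)
      have hsplit' : (done ++ [x]) ++ t = succList edges curr := by simpa using hsplit
      have hcount_le : ((done ++ [x]).count x : Int) ≤ ((succList edges curr).count x : Int) := by
        rw [← hsplit']
        simp only [List.count_append]
        push_cast
        omega
      have hkey : (done.count x : Int) + 1 ≤ inCnt edges P x := by
        have h1 := inCnt_ge_succ_count edges P curr x hPc
        have h2 : ((done ++ [x]).count x : Int) = (done.count x : Int) + 1 := by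
          rw [List.count_append]; push_cast; simp
        omega
      -- the single step
      have hstep : kahnStep curr (lv, ind, q) x =
          (lv.insert x (max (lv.getD x 0) (lv.getD curr 0 + 1)),
           ind.insert x (ind.getD x 0 - 1),
           if (ind.insert x (ind.getD x 0 - 1)).getD x 0 == 0 then q ++ [x] else q) := rfl
      rw [List.foldl_cons, hstep]
      have hlvcurr : lv.getD curr 0 = lpv edges step_ids.length curr := by
        rw [hlv curr hcs, if_neg (fun h => hnsl (hsplit ▸ List.mem_append.2 (Or.inl h))), hlevc]
      have hindx : (ind.insert x (ind.getD x 0 - 1)).getD x 0 =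
          inCnt edges P x - (((done ++ [x]).count x : Nat) : Int) := by
        rw [PySem.Dict.getD_insert, if_pos rfl, hind x hxstep, List.count_append]
        push_cast
        simp
        omega
      apply ih (done ++ [x])
      · exact hsplit'
      · rw [PySem.Dict.keys_insert_of_contains]
        · exact hkeys
        · rw [PySem.Dict.contains_iff_mem_keys, hkeys]; exact hxstep
      · -- level characterization
        intro v hv
        rw [PySem.Dict.getD_insert]
        by_cases hvx : v = x
        · subst hvx
          rw [if_pos rfl, if_pos (by simp), hlvcurr, hlv v hv]
          split_ifs with hvd
          · rw [max_assoc, max_self]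
          · rfl
        · rw [if_neg hvx, hlv v hv]
          have : (v ∈ done ++ [x]) ↔ v ∈ done := by simp [hvx]
          simp only [this]
      · -- indegree characterization
        intro v hv
        by_cases hvx : v = x
        · subst hvx
          exact hindx
        · rw [PySem.Dict.getD_insert, if_neg hvx, hind v hv, List.count_append]
          have : [x].count v = 0 := by simp [Ne.symm hvx]
          rw [this]
          push_cast
          omega
      · -- queue nodup
        split_ifs with hz
        · have hxq : x ∉ q := by
            intro hxq
            rcases (hq x).1 hxq with h | ⟨hd, hval⟩
            · have := hrest x h
              omega
            · simp only [beq_iff_eq] at hz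
              rw [hindx] at hz
              have : ((done ++ [x]).count x : Int) = (done.count x : Int) + 1 := by
                rw [List.count_append]; push_cast; simp
              omega
          rw [List.nodup_append]
          refine ⟨hqnd, List.nodup_singleton x, ?_⟩
          intro a ha b hb
          rw [List.mem_singleton] at hb
          subst hb
          exact fun h => hxq (h ▸ ha)
        · exact hqnd
      · -- queue membership characterization
        intro v
        have hval' : (ind.insert x (ind.getD x 0 - 1)).getD x 0 = 0 ↔
            inCnt edges P x - (((done ++ [x]).count x : Nat) : Int) = 0 := by rw [hindx]
        by_cases hvx : v = x
        · subst hvx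
          have hnotrest : v ∉ rest := by
            intro h
            have := hrest v h
            omega
          have hnotold : ¬(v ∈ done ∧ inCnt edges P v - (done.count v : Int) = 0) := by
            rintro ⟨_, h0⟩
            omega
          split_ifs with hz
          · simp only [beq_iff_eq] at hz
            constructor
            · intro _
              exact Or.inr ⟨by simp, by rw [← hindx]; exact hz⟩
            · intro _
              simp
          · simp only [beq_iff_eq] at hz
            rw [hindx] at hz
            constructor
            · intro hvq
              rcases (hq v).1 hvq with h | h
              · exact absurd h hnotrest
              · exact absurd h hnotold
            · rintro (h | ⟨_, hval⟩)
              · exact absurd h hnotrest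
              · exact absurd hval hz
        · have hcnt : (done ++ [x]).count v = done.count v := by simp [Ne.symm hvx]
          have hmem : (v ∈ done ++ [x]) ↔ v ∈ done := by simp [hvx]
          split_ifs with hz
          · constructor
            · intro hvq
              rcases List.mem_append.1 hvq with h | h
              · rcases (hq v).1 h with h' | ⟨h1, h2⟩
                · exact Or.inl h'
                · exact Or.inr ⟨hmem.2 h1, by rw [hcnt]; omega⟩
              · exact absurd (by simpa using h) hvx
            · rintro (h | ⟨h1, h2⟩)
              · exact List.mem_append.2 (Or.inl ((hq v).2 (Or.inl h)))
              · rw [hcnt] at h2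
                exact List.mem_append.2 (Or.inl ((hq v).2 (Or.inr ⟨hmem.1 h1, by omega⟩)))
          · constructor
            · intro hvq
              rcases (hq v).1 hvq with h' | ⟨h1, h2⟩
              · exact Or.inl h'
              · exact Or.inr ⟨hmem.2 h1, by rw [hcnt]; omega⟩
            · rintro (h | ⟨h1, h2⟩)
              · exact (hq v).2 (Or.inl h)
              · rw [hcnt] at h2
                exact (hq v).2 (Or.inr ⟨hmem.1 h1, by omega⟩)

-- the Kahn loop invariant (P = list of already-popped nodes)

def KInv (step_ids : List Int) (edges : List (Int × Int)) (P q : List Int)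
    (ind lv : PySem.Dict Int Int) (visited : Int) : Prop :=
  P.Nodup ∧ q.Nodup ∧ (∀ x ∈ P, x ∈ step_ids) ∧ (∀ x ∈ q, x ∈ step_ids ∧ x ∉ P) ∧
  (∀ v ∈ step_ids, ind.getD v 0 = inCnt edges P v) ∧
  (∀ v ∈ q, inCnt edges P v = 0) ∧
  (∀ v ∈ step_ids, v ∉ P → v ∉ q → inCnt edges P v ≠ 0) ∧
  (∀ v ∈ P, ∀ u ∈ preds edges v, u ∈ P) ∧
  (∀ v ∈ step_ids, lv.getD v 0 = lev edges step_ids.length P v) ∧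
  lv.keys = step_ids ∧
  visited = (P.length : Int)

-- every node of an n+1-element chain inside step_ids repeats: contradiction with acyclicity

lemma no_big_chain (step_ids : List Int) (edges : List (Int × Int))
    (hac : ∀ v ∈ step_ids, reachb edges step_ids.length v v = false)
    (cs : List Int) (hch : List.IsChain (fun a b => (b, a) ∈ edges) cs)
    (hsub : cs ⊆ step_ids) (hlen : cs.length = step_ids.length + 1) : False := by
  have hnodup : ¬ cs.Nodup := by
    intro hcn
    have := nodup_length_le cs step_ids hcn hsub
    omega
  obtain ⟨i, j, hi, hj, hij, heq⟩ := exists_dup_idx cs hnodup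
  have hr : reachb edges (j - i) (cs[i + (j - i)]'(by omega)) (cs[i]'(by omega)) = true :=
    chain_reach edges cs hch (j - i) i (by omega) (by omega)
  have h1 : cs[i + (j - i)]'(by omega) = cs[j]'hj := by congr 1; omega
  have h2 : cs[i]'(by omega) = cs[j]'hj := heq
  rw [h1, h2] at hr
  have hrn : reachb edges step_ids.length (cs[j]'hj) (cs[j]'hj) = true :=
    reachb_mono edges (by omega) _ _ hr
  have := hac _ (hsub (List.getElem_mem hj))
  simp_all

-- when the queue is empty every node has been popped

lemma all_popped (step_ids : List Int) (edges : List (Int × Int))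
    (hcl : ∀ p ∈ edges, p.1 ∈ step_ids ∧ p.2 ∈ step_ids)
    (hac : ∀ v ∈ step_ids, reachb edges step_ids.length v v = false)
    (P : List Int)
    (hstuck : ∀ v ∈ step_ids, v ∉ P → inCnt edges P v ≠ 0) :
    ∀ v ∈ step_ids, v ∈ P := by
  by_contra hcon
  push Not at hcon
  obtain ⟨v0, hv0s, hv0P⟩ := hcon
  have hpred : ∀ x : {x // x ∈ step_ids ∧ x ∉ P}, ∃ y : {x // x ∈ step_ids ∧ x ∉ P},
      (y.1, x.1) ∈ edges := by
    rintro ⟨x, hxs, hxP⟩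
    have hne := hstuck x hxs hxP
    have : (edges.filter (fun p => p.2 == x && !(P.contains p.1))) ≠ [] := by
      intro hnil
      unfold inCnt at hne
      rw [hnil] at hne
      simp at hne
    obtain ⟨p, hp⟩ := List.exists_mem_of_ne_nil _ this
    rcases List.mem_filter.1 hp with ⟨hpe, hcond⟩
    simp only [Bool.and_eq_true, beq_iff_eq, Bool.not_eq_true'] at hcond
    refine ⟨⟨p.1, (hcl p hpe).1, fun hmem => absurd hmem (by simpa using hcond.2)⟩, ?_⟩
    have hpe' : (p.1, p.2) ∈ edges := by simpa using hpe
    rw [hcond.1] at hpe'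
    exact hpe'
  let g : Nat → {x // x ∈ step_ids ∧ x ∉ P} :=
    fun k => Nat.rec ⟨v0, hv0s, hv0P⟩ (fun _ prev => (hpred prev).choose) k
  have hg : ∀ k, ((g (k + 1)).1, (g k).1) ∈ edges := fun k => (hpred (g k)).choose_spec
  set cs : List Int := (List.range (step_ids.length + 1)).map (fun k => (g k).1) with hcs
  apply no_big_chain step_ids edges hac cs
  · rw [List.isChain_iff_getElem]
    intro i hi
    simp only [hcs, List.getElem_map, List.getElem_range]
    exact hg i
  · intro x hx
    simp only [hcs, List.mem_map] at hx
    obtain ⟨k, _, rfl⟩ := hx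
    exact (g k).2.1
  · simp [hcs]

lemma kahnLoop_run (step_ids : List Int) (edges : List (Int × Int))
    (succ : PySem.Dict Int (List Int))
    (hsucc : ∀ c, succ.getD c [] = succList edges c)
    (hnd : step_ids.Nodup)
    (hcl : ∀ p ∈ edges, p.1 ∈ step_ids ∧ p.2 ∈ step_ids)
    (hac : ∀ v ∈ step_ids, reachb edges step_ids.length v v = false) :
    ∀ (fuel : Nat) (P q : List Int) (ind lv : PySem.Dict Int Int) (visited : Int),
    KInv step_ids edges P q ind lv visited →
    step_ids.length < fuel + P.length →
    (kahnLoop succ fuel q ind lv visited).2 = (step_ids.length : Int) ∧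
    (kahnLoop succ fuel q ind lv visited).1.keys = step_ids ∧
    ∀ v ∈ step_ids, (kahnLoop succ fuel q ind lv visited).1.getD v 0 =
      lpv edges step_ids.length v := by
  intro fuel
  induction fuel with
  | zero =>
      intro P q ind lv visited hinv hbound
      obtain ⟨hPnd, _, hPs, _, _, _, _, _, _, _, _⟩ := hinv
      have := nodup_length_le P step_ids hPnd hPs
      omega
  | succ fuel ih =>
      intro P q ind lv visited hinv hbound
      obtain ⟨hPnd, hqnd, hPs, hqs, hind, hqz, hzero, hpcl, hlv, hkeys, hvis⟩ := hinv
      cases q with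
      | nil =>
          simp only [kahnLoop]
          have hall : ∀ v ∈ step_ids, v ∈ P :=
            all_popped step_ids edges hcl hac P
              (fun v hv hvP => hzero v hv hvP (by simp))
          have hlen : P.length = step_ids.length := by
            have h1 := nodup_length_le P step_ids hPnd hPs
            have h2 := nodup_length_le step_ids P hnd hall
            omega
          refine ⟨by rw [hvis, hlen], hkeys, ?_⟩
          intro v hv
          rw [hlv v hv, lev_full edges step_ids.length P v
            (fun u hu => hall u (hcl (u, v) ((mem_preds_iff edges u v).1 hu)).1),
            lpv_stab step_ids edges hcl hac v hv]
      | cons curr rest =>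
          have hcurr : curr ∈ step_ids ∧ curr ∉ P := hqs curr (by simp)
          have hcz : inCnt edges P curr = 0 := hqz curr (by simp)
          have hcpred : ∀ u ∈ preds edges curr, u ∈ P :=
            preds_subset_of_inCnt_zero edges P curr hcz
          have hnsl : curr ∉ succList edges curr := by
            intro h
            exact hcurr.2 (hcpred curr ((mem_preds_iff edges curr curr).2
              ((mem_succList_iff edges curr curr).1 h)))
          have hlevc : lev edges step_ids.length P curr = lpv edges step_ids.length curr := by
            rw [lev_full edges step_ids.length P curr hcpred,
              lpv_stab step_ids edges hcl hac curr hcurr.1]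
          have hrest : ∀ v ∈ rest, inCnt edges P v = 0 := fun v hv => hqz v (by simp [hv])
          have hrestnd : rest.Nodup := (List.nodup_cons.1 hqnd).2
          obtain ⟨rkeys, rlv, rind, rqnd, rq⟩ :=
            inner_fold step_ids edges curr P rest hcl hcurr.2 hnsl hcurr.1 hlevc hrest
              (succList edges curr) [] lv ind rest rfl hkeys
              (fun v hv => by simpa using hlv v hv)
              (fun v hv => by simpa using hind v hv)
              hrestnd
              (fun v => by simp)
          have hloop : kahnLoop succ (fuel + 1) (curr :: rest) ind lv visited =
              kahnLoop succ fuel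
                ((succList edges curr).foldl (kahnStep curr) (lv, ind, rest)).2.2
                ((succList edges curr).foldl (kahnStep curr) (lv, ind, rest)).2.1
                ((succList edges curr).foldl (kahnStep curr) (lv, ind, rest)).1
                (visited + 1) := by
            simp only [kahnLoop, hsucc]
          rw [hloop]
          have hcnt_succ : ∀ v, v ∉ succList edges curr → (succList edges curr).count v = 0 :=
            fun v hv => List.count_eq_zero.2 hv
          have hPc' : ∀ v, v ∈ P ++ [curr] ↔ v ∈ P ∨ v = curr := by
            intro v; simp
          apply ih (P ++ [curr]) _ _ _ (visited + 1) _ (by simp only [List.length_append, List.length_cons, List.length_nil]; omega)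
          refine ⟨?_, rqnd, ?_, ?_, ?_, ?_, ?_, ?_, ?_, rkeys, ?_⟩
          · rw [List.nodup_append]
            exact ⟨hPnd, List.nodup_singleton _, fun a ha b hb => by
              rw [List.mem_singleton] at hb; subst hb; exact fun h => hcurr.2 (h ▸ ha)⟩
          · intro x hx
            rcases (hPc' x).1 hx with h | h
            · exact hPs x h
            · exact h ▸ hcurr.1
          · -- queue elements in step_ids and not popped
            intro x hx
            rcases (rq x).1 hx with h | ⟨h1, _⟩
            · have hx1 := hqs x (by simp [h])
              refine ⟨hx1.1, ?_⟩
              intro hmem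
              rcases (hPc' x).1 hmem with h' | h'
              · exact hx1.2 h'
              · exact (List.nodup_cons.1 hqnd).1 (h' ▸ h)
            · have hedge := (mem_succList_iff edges curr x).1 h1
              refine ⟨(hcl (curr, x) hedge).2, ?_⟩
              intro hmem
              rcases (hPc' x).1 hmem with h' | h'
              · exact hcurr.2 (hpcl x h' curr ((mem_preds_iff edges curr x).2 hedge))
              · exact hnsl (h' ▸ h1)
          · -- indegree
            intro v hv
            rw [rind v hv, inCnt_append edges P curr v hcurr.2]
          · -- queue zero
            intro v hv
            rw [inCnt_append edges P curr v hcurr.2]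
            rcases (rq v).1 hv with h | ⟨h1, h2⟩
            · have h0 := hrest v h
              have : v ∉ succList edges curr := by
                intro hmem
                have hge := inCnt_ge_succ_count edges P curr v hcurr.2
                have : 0 < (succList edges curr).count v := List.count_pos_iff.2 hmem
                omega
              rw [hcnt_succ v this] at *
              simp [h0]
            · exact h2
          · -- zero implies enqueued
            intro v hv hvP' hvq'
            rw [inCnt_append edges P curr v hcurr.2]
            intro h0
            have hvP : v ∉ P := fun h => hvP' ((hPc' v).2 (Or.inl h))
            have hvc : v ≠ curr := fun h => hvP' ((hPc' v).2 (Or.inr h))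
            by_cases hvs : v ∈ succList edges curr
            · exact hvq' ((rq v).2 (Or.inr ⟨hvs, h0⟩))
            · rw [hcnt_succ v hvs] at h0
              simp only [Nat.cast_zero, sub_zero] at h0
              have hvrest : v ∉ rest := fun h => hvq' ((rq v).2 (Or.inl h))
              have : v ∉ curr :: rest := by
                intro h
                rcases List.mem_cons.1 h with h' | h'
                · exact hvc h'
                · exact hvrest h'
              exact hzero v hv hvP this h0
          · -- preds of popped are popped
            intro v hv u hu
            rcases (hPc' v).1 hv with h | h
            · exact (hPc' u).2 (Or.inl (hpcl v h u hu))
            · subst h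
              exact (hPc' u).2 (Or.inl (hcpred u hu))
          · -- level characterization
            intro v hv
            rw [rlv v hv, lev_append edges step_ids.length P curr v hcurr.2]
            by_cases h : (curr, v) ∈ edges
            · rw [if_pos ((mem_succList_iff edges curr v).2 h), if_pos h]
            · rw [if_neg (fun hm => h ((mem_succList_iff edges curr v).1 hm)), if_neg h]
          · -- visited count
            rw [hvis]
            simp

lemma indeg_init_spec (step_ids : List Int) (edges : List (Int × Int)) (v : Int) :
    (edges.foldl (fun d p => d.insert p.2 (d.getD p.2 0 + 1))
      (step_ids.foldl (fun d sid => d.insert sid (0 : Int)) PySem.Dict.empty)).getD v 0 =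
      inCnt edges [] v := by
  have hfold : edges.foldl (fun d p => d.insert p.2 (d.getD p.2 0 + 1))
      (step_ids.foldl (fun d sid => d.insert sid (0 : Int)) PySem.Dict.empty) =
      (edges.map Prod.snd).foldl (fun d x => d.insert x (d.getD x 0 + 1))
        (step_ids.foldl (fun d sid => d.insert sid (0 : Int)) PySem.Dict.empty) := by
    rw [List.foldl_map]
  rw [hfold, PySem.Dict.getD_foldl_insert_add_one, dinit_getD]
  rw [inCnt_eq_countP, List.count_eq_countP, List.countP_map]
  simp only [List.contains_nil, Bool.not_false, Bool.and_true]
  rw [zero_add]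
  congr 1

lemma a_result (step_ids : List Int) (edges : List (Int × Int))
    (hnd : step_ids.Nodup)
    (hcl : ∀ p ∈ edges, p.1 ∈ step_ids ∧ p.2 ∈ step_ids)
    (hac : ∀ v ∈ step_ids, reachb edges step_ids.length v v = false) :
    topological_levels step_ids edges =
      step_ids.map (fun v => (v, lpv edges step_ids.length v)) := by
  simp only [topological_levels]
  have hsucc : ∀ c, (edges.foldl (fun d p => d.modify p.1 [] (· ++ [p.2]))
      PySem.Dict.empty).getD c [] = succList edges c := succ_dict_getD edges
  have hinv : KInv step_ids edges []
      (step_ids.filter (fun sid =>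
        (edges.foldl (fun d p => d.insert p.2 (d.getD p.2 0 + 1))
          (step_ids.foldl (fun d sid => d.insert sid (0 : Int)) PySem.Dict.empty)).getD sid 0 == 0))
      (edges.foldl (fun d p => d.insert p.2 (d.getD p.2 0 + 1))
        (step_ids.foldl (fun d sid => d.insert sid (0 : Int)) PySem.Dict.empty))
      (step_ids.foldl (fun d sid => d.insert sid (0 : Int)) PySem.Dict.empty) 0 := by
    have hqmem : ∀ v : Int, (v ∈ step_ids.filter (fun sid =>
        (edges.foldl (fun d p => d.insert p.2 (d.getD p.2 0 + 1))
          (step_ids.foldl (fun d sid => d.insert sid (0 : Int)) PySem.Dict.empty)).getD sid 0 == 0)) ↔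
        v ∈ step_ids ∧ inCnt edges [] v = 0 := by
      intro v
      rw [List.mem_filter]
      constructor
      · rintro ⟨h1, h2⟩
        rw [indeg_init_spec step_ids edges v] at h2
        exact ⟨h1, by simpa using h2⟩
      · rintro ⟨h1, h2⟩
        refine ⟨h1, ?_⟩
        rw [indeg_init_spec step_ids edges v]
        simpa using h2
    refine ⟨List.nodup_nil, List.Nodup.filter _ hnd, by simp, ?_, ?_, ?_, ?_, by simp, ?_, dinit_keys step_ids hnd, by simp⟩
    · intro x hx
      exact ⟨((hqmem x).1 hx).1, by simp⟩
    · intro v _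
      exact indeg_init_spec step_ids edges v
    · intro v hv
      exact ((hqmem v).1 hv).2
    · intro v hv _ hvq h0
      exact hvq ((hqmem v).2 ⟨hv, h0⟩)
    · intro v hv
      rw [dinit_getD, lev_nil]
  obtain ⟨h2, hkeys, hval⟩ := kahnLoop_run step_ids edges _ hsucc hnd hcl hac
    (step_ids.length + edges.length + 1) [] _ _ _ 0 hinv (by simp)
  rw [if_neg (by rw [h2]; simp)]
  rw [PySem.Dict.items_eq_map_keys _ (by rw [hkeys]; exact hnd) 0, hkeys]
  exact List.map_congr_left (fun v hv => by rw [hval v hv])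

-- ===== VERDICT (by name: the statement is the Claim_ definition above) =====
theorem topological_levels_spec : Claim_equal_topological_levels := by
  intro step_ids edges _ hpre
  unfold Spec_topological_levels
  obtain ⟨hnd, hcl, hac⟩ := hpre
  rw [a_result step_ids edges hnd hcl hac, alt_result step_ids edges hnd hcl hac]
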